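-- pv_equiv track=rewrite | github.com/Hoanthieu/cc | mang_con_lon_nhat.py | maxLeft
-- ===== SOURCE A (Python) =====
-- def maxLeft(a, first, last):
--     maxSum = -101010101
--     tong = 0
--     for i in range(last-1, first-1, -1):
--         tong += a[i]
--         if maxSum < tong:
--             maxSum = tong
--     return maxSum
-- ===== SOURCE B (Python) =====
-- def maxLeft(a, first, last):
--     # One forward pass: the max suffix sum of a[first:last] equals
--     # total - (minimum prefix sum), the sentinel covering the empty range.
--     prefix = 0
--     min_prefix = 0
--     for i in range(first, last):
--         if prefix < min_prefix:
--             min_prefix = prefix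
--         prefix += a[i]
--     if first < last:
--         return max(-101010101, prefix - min_prefix)
--     else:
--         return -101010101
-- ===== Notes on version B (the rewrite author's own statement) =====
-- stated objective: alternative
-- what changed: Replaced A's backward loop that accumulates suffix sums and tracks their running maximum by a forward pass that tracks the minimum prefix sum, returning max(sentinel, total - min_prefix) and the sentinel directly on an empty range.
import Mathlib
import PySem

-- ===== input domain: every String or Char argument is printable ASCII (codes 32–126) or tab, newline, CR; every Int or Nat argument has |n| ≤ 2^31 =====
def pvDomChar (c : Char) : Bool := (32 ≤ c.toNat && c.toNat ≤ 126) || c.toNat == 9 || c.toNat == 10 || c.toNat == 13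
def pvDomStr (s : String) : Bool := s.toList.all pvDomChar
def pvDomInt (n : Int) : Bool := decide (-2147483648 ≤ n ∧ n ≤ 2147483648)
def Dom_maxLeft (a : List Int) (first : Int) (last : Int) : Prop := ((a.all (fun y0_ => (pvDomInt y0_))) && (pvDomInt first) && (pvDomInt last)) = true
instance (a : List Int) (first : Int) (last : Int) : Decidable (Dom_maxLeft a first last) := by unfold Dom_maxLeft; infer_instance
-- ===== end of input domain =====

-- B replaces A's backward running-max suffix scan by a forward pass tracking the
-- minimum prefix sum (answer = total - min prefix, sentinel on the empty range): alternative decomposition, same cost.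

-- ===== PORT A =====
-- backward loop over range(last-1, first-1, -1), state (maxSum, tong)
def maxLeft (a : List Int) (first : Int) (last : Int) : Int :=
  ((PySem.List.pyRange (last - 1) (first - 1) (-1)).foldl
    (fun (s : Int × Int) i =>
      let tong := s.2 + PySem.List.pyGetD a i 0
      (if s.1 < tong then tong else s.1, tong))
    (-101010101, 0)).1

-- ===== PORT B =====
-- forward loop over range(first, last), state (prefix, min_prefix)
def maxLeft_alt (a : List Int) (first : Int) (last : Int) : Int :=
  let s := (PySem.List.pyRange first last 1).foldl
    (fun (s : Int × Int) i =>
      (s.1 + PySem.List.pyGetD a i 0, if s.1 < s.2 then s.1 else s.2))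
    (0, 0)
  if first < last then max (-101010101) (s.1 - s.2) else -101010101

-- ===== PRECONDITION & SPEC =====
-- Pre_ excludes exactly the inputs where Python A raises IndexError (some index of the nonempty range out of [-len, len)).
def Pre_maxLeft (a : List Int) (first : Int) (last : Int) : Prop :=
  first < last → (-(a.length : Int) ≤ first ∧ last ≤ (a.length : Int))
instance (a : List Int) (first : Int) (last : Int) : Decidable (Pre_maxLeft a first last) := by unfold Pre_maxLeft; infer_instance
def pvWitness_maxLeft : List Int × Int × Int := ([1, -2, 3], 0, 3)

def Spec_maxLeft (a : List Int) (first : Int) (last : Int) (out : Int) : Prop := out = maxLeft_alt a first last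
instance (a : List Int) (first : Int) (last : Int) (out : Int) : Decidable (Spec_maxLeft a first last out) := by unfold Spec_maxLeft; infer_instance

-- ===== CLAIM (what is proved, stated in full; the proofs are below) =====
def Claim_equal_maxLeft : Prop := ∀ (a : List Int) (first : Int) (last : Int), Dom_maxLeft a first last → Pre_maxLeft a first last → Spec_maxLeft a first last (maxLeft a first last)

-- ===== LEMMAS AND PROOFS =====

-- minimum over the proper prefix sums (lengths 0 .. len-1) of a nonempty list; 0 on []
def mpref : List Int → Int
  | [] => 0
  | [_] => 0
  | x :: r => min 0 (x + mpref r)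

theorem mpref_nonpos (xs : List Int) : mpref xs ≤ 0 := by
  induction xs with
  | nil => simp [mpref]
  | cons x r ih =>
    cases r with
    | nil => simp [mpref]
    | cons y t => simp only [mpref]; omega

-- A's fold, written as a foldr on the forward element list (A walks it reversed)
theorem afold_char (xs : List Int) (h : xs ≠ []) :
    xs.foldr (fun x (s : Int × Int) =>
        (if s.1 < s.2 + x then s.2 + x else s.1, s.2 + x)) (-101010101, 0)
      = (max (-101010101) (xs.sum - mpref xs), xs.sum) := by
  induction xs with
  | nil => exact absurd rfl h
  | cons x r ih =>
    cases r with
    | nil => simp [mpref]; omega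
    | cons y t =>
      simp only [List.foldr_cons, ih (by simp)]
      simp only [mpref, List.sum_cons, Prod.mk.injEq]
      refine ⟨?_, by ring⟩
      split <;> omega

-- B's fold with a general accumulator
theorem bfold_char (xs : List Int) (h : xs ≠ []) : ∀ (p mn : Int),
    xs.foldl (fun (s : Int × Int) x =>
        (s.1 + x, if s.1 < s.2 then s.1 else s.2)) (p, mn)
      = (p + xs.sum, min mn (p + mpref xs)) := by
  induction xs with
  | nil => exact absurd rfl h
  | cons x r ih =>
    intro p mn
    cases r with
    | nil => simp only [List.foldl_cons, List.foldl_nil, mpref, List.sum_cons, List.sum_nil, Prod.mk.injEq]; refine ⟨by ring, by split <;> omega⟩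
    | cons y t =>
      simp only [List.foldl_cons, ih (by simp)]
      simp only [mpref, List.sum_cons, Prod.mk.injEq]
      refine ⟨by ring, ?_⟩
      split <;> omega

-- ===== VERDICT (by name: the statement is the Claim_ definition above) =====
theorem maxLeft_spec : Claim_equal_maxLeft := by
  intro a first last _ _
  unfold Spec_maxLeft maxLeft maxLeft_alt
  have hrg : PySem.List.pyRange (last - 1) (first - 1) (-1)
      = (PySem.List.pyRange first last 1).reverse := by
    rw [PySem.List.pyRange_neg_one_eq_reverse]
    norm_num
  rw [hrg, List.foldl_reverse]
  by_cases hlt : first < last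
  · set E : List Int := (PySem.List.pyRange first last 1).map (fun i => PySem.List.pyGetD a i 0) with hE
    have hfr : (PySem.List.pyRange first last 1).foldr
        (fun i (s : Int × Int) =>
          (if s.1 < s.2 + PySem.List.pyGetD a i 0 then s.2 + PySem.List.pyGetD a i 0 else s.1,
            s.2 + PySem.List.pyGetD a i 0)) (-101010101, 0)
        = E.foldr (fun x (s : Int × Int) =>
            (if s.1 < s.2 + x then s.2 + x else s.1, s.2 + x)) (-101010101, 0) := by
      rw [hE, List.foldr_map]
    have hfl : (PySem.List.pyRange first last 1).foldl
        (fun (s : Int × Int) i =>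
          (s.1 + PySem.List.pyGetD a i 0, if s.1 < s.2 then s.1 else s.2)) (0, 0)
        = E.foldl (fun (s : Int × Int) x =>
            (s.1 + x, if s.1 < s.2 then s.1 else s.2)) (0, 0) := by
      rw [hE, List.foldl_map]
    have hne : E ≠ [] := by
      rw [hE]
      simp [PySem.List.length_pyRange_one, List.eq_nil_iff_length_eq_zero]
      omega
    simp only [hfr, hfl, afold_char E hne, bfold_char E hne 0 0, if_pos hlt]
    have hm := mpref_nonpos E
    simp only [max_def]
    split_ifs <;> omega
  · rw [PySem.List.pyRange_one_eq_nil (by omega)]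
    simp [hlt]
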